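-- pv_equiv track=rewrite | github.com/jianzuoyi/Unicycler | lib/assembly_graph.py | find_replace_in_list
-- ===== SOURCE A (Python) =====
-- def find_replace_in_list(lst, pattern, replacement):
--     '''
--     This function looks for the given pattern in the list and if found, replaces it.
--     Example: find_replace_in_list([1,5,8,3], [5,8], 7) -> [1,7,3]
--     If there are multiple occurrences, it will replace them all.
--     '''
--     replacement_made = True
--     while replacement_made:
--         replacement_made = False
--         for i, _ in enumerate(lst):
--             if lst[i] == pattern[0] and lst[i:i+len(pattern)] == pattern:
--                 replacement_made = True
--                 lst = lst[:i] + [replacement] + lst[i+len(pattern):]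
--                 break
--     return lst
-- ===== SOURCE B (Python) =====
-- def find_replace_in_list(lst, pattern, replacement):
--     '''Single-pass stack build: push elements, collapse a trailing pattern match into
--     the replacement and re-check so cascaded matches are caught (a different algorithm,
--     same result).'''
--     m = len(pattern)
--     stack = []
--     for x in lst:
--         stack.append(x)
--         while m and len(stack) >= m and stack[-m:] == pattern:
--             del stack[-m:]
--             stack.append(replacement)
--     return stack
-- ===== Notes on version B (the rewrite author's own statement) =====
-- stated objective: alternative
-- what changed: A restarts a full scan-and-splice pass after every single replacement; B makes one left-to-right pass maintaining a stack and collapses a trailing pattern match into the replacement with a re-check for cascaded matches.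
import Mathlib
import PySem

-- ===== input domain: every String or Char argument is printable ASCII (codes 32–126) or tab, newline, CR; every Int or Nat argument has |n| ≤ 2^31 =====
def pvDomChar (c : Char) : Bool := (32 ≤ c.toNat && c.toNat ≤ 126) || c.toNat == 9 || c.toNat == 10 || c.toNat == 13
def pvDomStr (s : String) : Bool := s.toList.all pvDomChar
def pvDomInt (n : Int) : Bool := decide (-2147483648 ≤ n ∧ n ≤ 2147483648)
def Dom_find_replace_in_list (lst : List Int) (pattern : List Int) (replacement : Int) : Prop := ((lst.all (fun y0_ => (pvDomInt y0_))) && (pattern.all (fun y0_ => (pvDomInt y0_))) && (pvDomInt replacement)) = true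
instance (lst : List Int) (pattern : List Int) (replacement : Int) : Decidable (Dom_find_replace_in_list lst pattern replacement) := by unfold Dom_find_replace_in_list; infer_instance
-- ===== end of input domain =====

-- B replaces A's restart-the-scan-after-every-replacement loop by a single left-to-right
-- pass over lst maintaining a stack whose trailing pattern matches are collapsed into the
-- replacement (with re-check for cascades); a different algorithm, not claimed faster.

-- ===== PORT A =====
-- A's inner `for i,_ in enumerate(lst)` scan: recursion over the suffix starting at index i
-- (lst[i] is the suffix's head, lst[i:i+len(pattern)] is `take pattern.length` of the suffix);
-- pattern[0] is ported as pattern.headD 0, exact whenever pattern ≠ [] (empty pattern with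
-- nonempty lst raises IndexError in Python and is outside Pre_).
def aFindGo (p : List Int) : List Int → Nat → Option Nat
  | [], _ => none
  | x :: rest, i =>
    if x = p.headD 0 ∧ List.take p.length (x :: rest) = p then some i
    else aFindGo p rest (i + 1)

-- A's `while replacement_made` loop; each iteration performs the first (leftmost) replacement
-- or stops.  Fuel lst.length + 1 bounds the iteration count on every input in Pre_
-- (proved via steps_bound below); Python's slices lst[:i] / lst[i+len(pattern):] are take/drop.
def find_replace_in_list_go (p : List Int) (r : Int) : Nat → List Int → List Int
  | 0, lst => lst
  | f + 1, lst =>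
    match aFindGo p lst 0 with
    | none => lst
    | some i => find_replace_in_list_go p r f (List.take i lst ++ r :: List.drop (i + p.length) lst)

def find_replace_in_list (lst : List Int) (pattern : List Int) (replacement : Int) : List Int :=
  find_replace_in_list_go pattern replacement (lst.length + 1) lst

-- ===== PORT B =====
-- Source B's inner `while m and len(stack) >= m and stack[-m:] == pattern` loop; with m ≥ 1 and
-- m ≤ len(stack), stack[-m:] is `drop (len - m)`.  Each call gets fuel (s++[x]).length, which
-- bounds the collapse count on every input in Pre_ (proved via collapse_main below).
def collapse (p : List Int) (r : Int) : Nat → List Int → List Int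
  | 0, s => s
  | f + 1, s =>
    if p.length ≠ 0 ∧ p.length ≤ s.length ∧ List.drop (s.length - p.length) s = p
    then collapse p r f (List.take (s.length - p.length) s ++ [r])
    else s

def find_replace_in_list_alt (lst : List Int) (pattern : List Int) (replacement : Int) : List Int :=
  lst.foldl (fun s x => collapse pattern replacement (s.length + 1) (s ++ [x])) []

-- ===== PRECONDITION & SPEC =====
-- Pre_ excludes only inputs on which A does not return: pattern = [] with lst ≠ [] (IndexError
-- on pattern[0]) and pattern = [replacement] with replacement ∈ lst (A rewrites in place forever).
def Pre_find_replace_in_list (lst : List Int) (pattern : List Int) (replacement : Int) : Prop :=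
  (lst = [] ∨ pattern ≠ []) ∧ (pattern = [replacement] → replacement ∉ lst)
instance (lst : List Int) (pattern : List Int) (replacement : Int) : Decidable (Pre_find_replace_in_list lst pattern replacement) := by
  unfold Pre_find_replace_in_list; infer_instance

def pvWitness_find_replace_in_list : List Int × List Int × Int := ([1, 5, 8, 3], [5, 8], 7)

def Spec_find_replace_in_list (lst : List Int) (pattern : List Int) (replacement : Int) (out : List Int) : Prop := out = find_replace_in_list_alt lst pattern replacement
instance (lst : List Int) (pattern : List Int) (replacement : Int) (out : List Int) : Decidable (Spec_find_replace_in_list lst pattern replacement out) := by unfold Spec_find_replace_in_list; infer_instance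

-- ===== CLAIM (what is proved, stated in full; the proofs are below) =====
def Claim_equal_find_replace_in_list : Prop := ∀ (lst : List Int) (pattern : List Int) (replacement : Int), Dom_find_replace_in_list lst pattern replacement → Pre_find_replace_in_list lst pattern replacement → Spec_find_replace_in_list lst pattern replacement (find_replace_in_list lst pattern replacement)

-- ===== LEMMAS AND PROOFS =====

-- `Occ p l i` : the pattern p occurs in l at position i.
def Occ (p l : List Int) (i : Nat) : Prop :=
  i + p.length ≤ l.length ∧ List.take p.length (List.drop i l) = p

-- `NF p l` : no occurrence of p in l (the loop of A stops, the stack of B is collapsed).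
def NF (p l : List Int) : Prop := ∀ i, ¬ Occ p l i

theorem occ_zero (p l : List Int) : Occ p l 0 ↔ List.take p.length l = p := by
  constructor
  · intro h; simpa using h.2
  · intro h
    have hl : p.length ≤ l.length := by
      have := congrArg List.length h
      simp at this; omega
    exact ⟨by omega, by simpa using h⟩

theorem occ_cons (p : List Int) (x : Int) (rest : List Int) (i : Nat) :
    Occ p (x :: rest) (i + 1) ↔ Occ p rest i := by
  unfold Occ
  constructor
  · intro h
    have h1 := h.1
    simp only [List.length_cons] at h1
    refine ⟨by omega, ?_⟩
    have := h.2
    simpa [List.drop_succ_cons] using this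
  · intro h
    have h1 := h.1
    refine ⟨by simp only [List.length_cons]; omega, ?_⟩
    simpa [List.drop_succ_cons] using h.2

theorem occ_append_left (p u z : List Int) (j : Nat) (hj : j + p.length ≤ u.length)
    (h : Occ p (u ++ z) j) : Occ p u j := by
  refine ⟨hj, ?_⟩
  have hd : List.drop j (u ++ z) = List.drop j u ++ z :=
    List.drop_append_of_le_length (by omega)
  have ht : List.take p.length (List.drop j u ++ z) = List.take p.length (List.drop j u) :=
    List.take_append_of_le_length (by simp; omega)
  have := h.2
  rw [hd, ht] at this
  exact this

theorem occ_append_of_occ (p u z : List Int) (j : Nat) (h : Occ p u j) : Occ p (u ++ z) j := by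
  have h1 := h.1
  refine ⟨by simp; omega, ?_⟩
  have hd : List.drop j (u ++ z) = List.drop j u ++ z :=
    List.drop_append_of_le_length (by have := h.1; omega)
  have ht : List.take p.length (List.drop j u ++ z) = List.take p.length (List.drop j u) :=
    List.take_append_of_le_length (by simp; have := h.1; omega)
  rw [hd, ht]; exact h.2

theorem nf_take (p u : List Int) (n : Nat) (h : NF p u) : NF p (List.take n u) := by
  intro j hj
  have : Occ p u j := by
    have := occ_append_of_occ p (List.take n u) (List.drop n u) j hj
    simpa using this
  exact h j this

theorem nf_nil (p : List Int) (hp : p ≠ []) : NF p [] := by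
  intro i hi
  have h1 := hi.1
  have h2 : 0 < p.length := List.length_pos_of_ne_nil hp
  simp only [List.length_nil] at h1
  omega

theorem cond_iff (p : List Int) (hp : p ≠ []) (x : Int) (rest : List Int) :
    (x = p.headD 0 ∧ List.take p.length (x :: rest) = p) ↔ List.take p.length (x :: rest) = p := by
  constructor
  · exact fun h => h.2
  · intro h
    refine ⟨?_, h⟩
    cases p with
    | nil => exact absurd rfl hp
    | cons c q =>
      rw [List.length_cons, List.take_succ_cons] at h
      have h1 : x = c := by injection h
      simp [h1]

theorem aFindGo_shift (p l : List Int) : ∀ j, aFindGo p l j = (aFindGo p l 0).map (· + j) := by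
  induction l with
  | nil => intro j; simp [aFindGo]
  | cons x rest ih =>
    intro j
    by_cases h : x = p.headD 0 ∧ List.take p.length (x :: rest) = p
    · simp only [aFindGo, if_pos h, Option.map_some, Nat.zero_add]
    · simp only [aFindGo, if_neg h]
      rw [ih (j + 1), ih 1, Option.map_map]
      congr 1
      funext a
      simp; omega

theorem aFindGo_none (p : List Int) (hp : p ≠ []) :
    ∀ l, aFindGo p l 0 = none ↔ NF p l := by
  intro l
  induction l with
  | nil => simp [aFindGo, nf_nil p hp]
  | cons x rest ih =>
    by_cases h : List.take p.length (x :: rest) = p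
    · have hc : x = p.headD 0 ∧ List.take p.length (x :: rest) = p := (cond_iff p hp x rest).mpr h
      simp only [aFindGo, if_pos hc]
      constructor
      · intro hh; exact absurd hh (by simp)
      · intro hnf; exact absurd ((occ_zero p (x :: rest)).mpr h) (hnf 0)
    · have hc : ¬ (x = p.headD 0 ∧ List.take p.length (x :: rest) = p) := by
        intro hh; exact h hh.2
      simp only [aFindGo, if_neg hc]
      rw [aFindGo_shift p rest 1]
      constructor
      · intro hh
        have hrest : aFindGo p rest 0 = none := by
          cases he : aFindGo p rest 0 with
          | none => rfl
          | some k => rw [he] at hh; simp at hh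
        have hnf := ih.mp hrest
        intro i
        cases i with
        | zero => intro hocc; exact h ((occ_zero p (x :: rest)).mp hocc)
        | succ i' => intro hocc; exact hnf i' ((occ_cons p x rest i').mp hocc)
      · intro hnf
        have : NF p rest := fun i hi => hnf (i+1) ((occ_cons p x rest i).mpr hi)
        rw [ih.mpr this]; rfl

theorem aFindGo_some (p : List Int) (hp : p ≠ []) :
    ∀ l i, aFindGo p l 0 = some i → Occ p l i ∧ ∀ j, j < i → ¬ Occ p l j := by
  intro l
  induction l with
  | nil => intro i h; simp [aFindGo] at h
  | cons x rest ih =>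
    intro i h
    by_cases hc : x = p.headD 0 ∧ List.take p.length (x :: rest) = p
    · simp only [aFindGo, if_pos hc] at h
      injection h with h
      subst h
      exact ⟨(occ_zero p (x :: rest)).mpr hc.2, fun j hj => by omega⟩
    · simp only [aFindGo, if_neg hc] at h
      rw [aFindGo_shift p rest 1] at h
      cases he : aFindGo p rest 0 with
      | none => rw [he] at h; simp at h
      | some i' =>
        rw [he] at h; simp at h
        obtain ⟨hocc, hmin⟩ := ih i' he
        subst h
        refine ⟨(occ_cons p x rest i').mpr hocc, ?_⟩
        intro j hj
        cases j with
        | zero =>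
          intro ho
          exact hc ((cond_iff p hp x rest).mpr ((occ_zero p (x :: rest)).mp ho))
        | succ j' =>
          intro ho
          exact hmin j' (by omega) ((occ_cons p x rest j').mp ho)

theorem aFindGo_eq_some (p : List Int) (hp : p ≠ []) (l : List Int) (i : Nat)
    (hocc : Occ p l i) (hmin : ∀ j, j < i → ¬ Occ p l j) : aFindGo p l 0 = some i := by
  cases he : aFindGo p l 0 with
  | none => exact absurd hocc ((aFindGo_none p hp l).mp he i)
  | some k =>
    obtain ⟨hk, hkmin⟩ := aFindGo_some p hp l k he
    rcases Nat.lt_trichotomy k i with h | h | h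
    · exact absurd hk (hmin k h)
    · rw [h]
    · exact absurd hocc (hkmin i h)

-- Chains of leftmost rewrites (the steps A's while-loop performs).
inductive LSteps (p : List Int) (r : Int) : List Int → List Int → Nat → Prop
  | refl (l : List Int) : LSteps p r l l 0
  | step {l l' : List Int} {k : Nat} (i : Nat)
      (h : aFindGo p l 0 = some i)
      (hs : LSteps p r (List.take i l ++ r :: List.drop (i + p.length) l) l' k) :
      LSteps p r l l' (k + 1)

theorem lsteps_trans (p : List Int) (r : Int) {l l' l'' : List Int} {k k' : Nat}
    (h1 : LSteps p r l l' k) (h2 : LSteps p r l' l'' k') : LSteps p r l l'' (k + k') := by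
  induction h1 with
  | refl => simpa using h2
  | step i h hs ih =>
    have := LSteps.step i h (ih h2)
    simpa [Nat.add_right_comm] using this

theorem aLoop_eq (p : List Int) (r : Int) {l nf : List Int} {k : Nat}
    (hch : LSteps p r l nf k) :
    aFindGo p nf 0 = none → ∀ f, k ≤ f → find_replace_in_list_go p r f l = nf := by
  induction hch with
  | refl l =>
    intro hnf f _
    cases f with
    | zero => rfl
    | succ f' => simp [find_replace_in_list_go, hnf]
  | step i h hs ih =>
    intro hnf f hf
    cases f with
    | zero => omega
    | succ f' =>
      simp only [find_replace_in_list_go, h]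
      exact ih hnf f' (by omega)

-- length bookkeeping for one rewrite step
theorem step_length (p : List Int) (r : Int) (l : List Int) (i : Nat) (h : Occ p l i) :
    (List.take i l ++ r :: List.drop (i + p.length) l).length + p.length = l.length + 1 := by
  have h1 := h.1
  simp [List.length_append, List.length_take, List.length_drop]
  omega

theorem occ_single_mem (c : Int) (l : List Int) (i : Nat) (h : Occ [c] l i) : c ∈ l := by
  have h1 := h.1
  have h2 := h.2
  simp only [List.length_singleton] at h1 h2
  have hd : List.drop i l = l[i] :: List.drop (i + 1) l := List.drop_eq_getElem_cons (by omega)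
  rw [hd, List.take_succ_cons, List.take_zero] at h2
  have hc : l[i] = c := by injection h2
  exact hc ▸ List.getElem_mem (by omega)

theorem mem_occ_single (c : Int) (l : List Int) (h : c ∈ l) : ∃ i, Occ [c] l i := by
  obtain ⟨i, hi, he⟩ := List.mem_iff_getElem.mp h
  refine ⟨i, by simpa using hi, ?_⟩
  have hd : List.drop i l = l[i] :: List.drop (i + 1) l := List.drop_eq_getElem_cons hi
  rw [hd]; simp [he]

theorem step_count (c r : Int) (l : List Int) (i : Nat) (hr : r ≠ c) (h : Occ [c] l i) :
    (List.take i l ++ r :: List.drop (i + 1) l).count c + 1 = l.count c := by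
  have h1 := h.1
  have h2 := h.2
  simp only [List.length_singleton] at h1 h2
  have hd : List.drop i l = l[i] :: List.drop (i + 1) l := List.drop_eq_getElem_cons (by omega)
  have hc : l[i] = c := by
    rw [hd, List.take_succ_cons, List.take_zero] at h2
    injection h2
  conv_rhs => rw [← List.take_append_drop i l, hd, hc]
  rw [List.count_append, List.count_append, List.count_cons_of_ne hr, List.count_cons_self]
  omega

-- every chain inside Pre_ has at most l.length + 1 steps (enough for A's fuel)
theorem steps_bound2 (p : List Int) (r : Int) (hp : 2 ≤ p.length) {l nf : List Int} {k : Nat}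
    (h : LSteps p r l nf k) : k + nf.length ≤ l.length + 1 := by
  induction h with
  | refl l => omega
  | step i hf hs ih =>
    rename_i l l' k
    have hocc : Occ p l i := (aFindGo_some p (by intro hh; subst hh; simp at hp) l i hf).1
    have := step_length p r l i hocc
    omega

theorem steps_bound1 (c r : Int) (hr : r ≠ c) {l nf : List Int} {k : Nat}
    (h : LSteps [c] r l nf k) : k ≤ l.count c := by
  induction h with
  | refl l => omega
  | step i hf hs ih =>
    rename_i l l' k
    have hocc : Occ [c] l i := (aFindGo_some [c] (by simp) l i hf).1
    have hsc := step_count c r l i hr hocc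
    simp only [List.length_singleton] at ih
    omega

theorem steps_bound (p : List Int) (r : Int) (hp : p ≠ []) {l nf : List Int} {k : Nat}
    (hpre : p = [r] → r ∉ l) (h : LSteps p r l nf k) : k ≤ l.length + 1 := by
  rcases Nat.lt_or_ge p.length 2 with h2 | h2
  · -- p.length = 1
    have : ∃ c, p = [c] := by
      cases p with
      | nil => exact absurd rfl hp
      | cons a q =>
        cases q with
        | nil => exact ⟨a, rfl⟩
        | cons b q' => simp at h2
    obtain ⟨c, hc⟩ := this
    subst hc
    by_cases hrc : r = c
    · subst hrc
      cases h with
      | refl => omega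
      | step i hf hs =>
        have hocc : Occ [r] l i := (aFindGo_some [r] (by simp) l i hf).1
        exact absurd (occ_single_mem r l i hocc) (hpre rfl)
    · have hb := steps_bound1 c r hrc h
      have hcl : l.count c ≤ l.length := List.count_le_length
      omega
  · have := steps_bound2 p r h2 h
    omega

-- the collapse loop of B performs exactly leftmost rewrites and ends pattern-free
theorem collapse_stop1 (p : List Int) (r : Int) (u : List Int) (hne : p ≠ [r]) (hp1 : p.length = 1) :
    ∀ g, collapse p r g (u ++ [r]) = u ++ [r] := by
  intro g
  cases g with
  | zero => rfl
  | succ g' =>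
    have hcond : ¬ (p.length ≠ 0 ∧ p.length ≤ (u ++ [r]).length ∧
        List.drop ((u ++ [r]).length - p.length) (u ++ [r]) = p) := by
      intro ⟨_, _, hd⟩
      have : List.drop u.length (u ++ [r]) = [r] := by simp
      rw [show (u ++ [r]).length - p.length = u.length by simp [hp1]] at hd
      rw [this] at hd
      exact hne hd.symm
    simp only [collapse, if_neg hcond]

theorem collapse_main (p : List Int) (r : Int) (hp : p ≠ []) :
    ∀ f u y, NF p u → (p = [r] → y ≠ r) → u.length + 1 ≤ f →
      NF p (collapse p r f (u ++ [y])) ∧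
      ∀ rest, ∃ k, LSteps p r ((u ++ [y]) ++ rest) (collapse p r f (u ++ [y]) ++ rest) k := by
  intro f
  induction f with
  | zero => intro u y _ _ hf; omega
  | succ f ih =>
    intro u y hnf hy hf
    have hm : p.length ≠ 0 := by simpa using hp
    have htl : (u ++ [y]).length = u.length + 1 := by simp
    by_cases hcond : p.length ≠ 0 ∧ p.length ≤ (u ++ [y]).length ∧
        List.drop ((u ++ [y]).length - p.length) (u ++ [y]) = p
    · have hstep : collapse p r (f + 1) (u ++ [y]) =
          collapse p r f (List.take ((u ++ [y]).length - p.length) (u ++ [y]) ++ [r]) := by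
        simp only [collapse, if_pos hcond]
      obtain ⟨-, hmle, hdrop⟩ := hcond
      rw [htl] at hmle hdrop hstep
      have hnu : u.length + 1 - p.length ≤ u.length := by omega
      have hau : List.take (u.length + 1 - p.length) (u ++ [y]) =
          List.take (u.length + 1 - p.length) u := List.take_append_of_le_length hnu
      rw [hau] at hstep
      set a := List.take (u.length + 1 - p.length) u with ha2
      have hal : a.length = u.length + 1 - p.length := by
        rw [ha2, List.length_take]; omega
      have hta : u ++ [y] = a ++ p := by
        have h0 := List.take_append_drop (u.length + 1 - p.length) (u ++ [y])
        rw [hdrop, hau] at h0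
        exact h0.symm
      have hnfa : NF p a := nf_take p u _ hnf
      have hmin : ∀ (z : List Int) (j : Nat), j < a.length → ¬ Occ p ((u ++ [y]) ++ z) j := by
        intro z j hj hocc
        have hju : j + p.length ≤ u.length := by omega
        have h1 : (u ++ [y]) ++ z = u ++ ([y] ++ z) := by simp
        exact hnf j (occ_append_left p u ([y] ++ z) j hju (h1 ▸ hocc))
      have hoccz : ∀ z : List Int, Occ p ((u ++ [y]) ++ z) a.length := by
        intro z
        refine ⟨by simp [hta], ?_⟩
        have h1 : (u ++ [y]) ++ z = a ++ (p ++ z) := by simp [hta]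
        rw [h1, List.drop_left, List.take_left]
      have hfind : ∀ z : List Int, aFindGo p ((u ++ [y]) ++ z) 0 = some a.length := by
        intro z
        exact aFindGo_eq_some p hp _ _ (hoccz z) (fun j hj => hmin z j hj)
      have hrw : ∀ z : List Int,
          List.take a.length ((u ++ [y]) ++ z) ++
            r :: List.drop (a.length + p.length) ((u ++ [y]) ++ z) = (a ++ [r]) ++ z := by
        intro z
        have h1 : (u ++ [y]) ++ z = a ++ (p ++ z) := by simp [hta]
        have h2 : a.length + p.length = (a ++ p).length := by simp
        rw [h1, List.take_left, show a ++ (p ++ z) = (a ++ p) ++ z by simp, h2,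
          List.drop_left]
        simp
      by_cases hm1 : p.length = 1
      · -- p = [y]: one rewrite, then the trailing element r no longer matches
        have hpy : p = [y] := by
          have hd1 : List.drop u.length (u ++ [y]) = [y] := by simp
          rw [show u.length + 1 - p.length = u.length by omega, hd1] at hdrop
          exact hdrop.symm
        have hry : r ≠ y := fun hh => hy (by rw [hpy, hh]) hh.symm
        have hne : p ≠ [r] := by
          rw [hpy]; intro hh; injection hh with hh; exact hry hh.symm
        have hau' : a = u := by
          rw [ha2, show u.length + 1 - p.length = u.length by omega, List.take_length]
        have hcoll : collapse p r (f + 1) (u ++ [y]) = u ++ [r] := by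
          rw [hstep, hau']
          exact collapse_stop1 p r u hne hm1 f
        rw [hcoll]
        constructor
        · intro i hocc
          have hi := hocc.1
          simp only [List.length_append, List.length_singleton] at hi
          rcases Nat.lt_or_ge (i + p.length) (u.length + 1) with hlt | hge
          · exact hnf i (occ_append_left p u [r] i (by omega) hocc)
          · have hieq : i = u.length := by omega
            have h2 := hocc.2
            rw [hieq, List.drop_left, hpy] at h2
            simp at h2
            exact hry h2
        · intro rest
          refine ⟨1, ?_⟩
          have h1 := hfind rest
          have h2 := hrw rest
          rw [hau'] at h1 h2
          refine LSteps.step u.length h1 ?_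
          rw [h2]
          exact LSteps.refl _
      · -- p.length ≥ 2: strictly smaller stack, recurse on the fuel
        have hm2 : 2 ≤ p.length := by omega
        have hfa : a.length + 1 ≤ f := by omega
        have hyr : p = [r] → r ≠ r := by
          intro hh; exfalso; rw [hh] at hm2; simp at hm2
        obtain ⟨ihnf, ihch⟩ := ih a r hnfa hyr hfa
        rw [hstep]
        refine ⟨ihnf, ?_⟩
        intro rest
        obtain ⟨k, hk⟩ := ihch rest
        exact ⟨k + 1, LSteps.step a.length (hfind rest) (by rw [hrw rest]; exact hk)⟩
    · -- no trailing match: the stack is already pattern-free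
      have hcoll : collapse p r (f + 1) (u ++ [y]) = u ++ [y] := by
        simp only [collapse, if_neg hcond]
      rw [hcoll]
      refine ⟨?_, fun rest => ⟨0, LSteps.refl _⟩⟩
      intro i hocc
      have hi := hocc.1
      rw [htl] at hi
      rcases Nat.lt_or_ge (i + p.length) (u.length + 1) with hlt | hge
      · exact hnf i (occ_append_left p u [y] i (by omega) hocc)
      · have hieq : i = u.length + 1 - p.length := by omega
        have h2 := hocc.2
        have hlen : (List.drop i (u ++ [y])).length = p.length := by
          rw [List.length_drop, htl]; omega
        have hdi : List.drop i (u ++ [y]) = p := by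
          rw [← h2]
          exact (List.take_of_length_le (by omega)).symm
        exact hcond ⟨hm, by rw [htl]; omega, by rw [htl, ← hieq]; exact hdi⟩

-- B's fold maintains: the stack is pattern-free and the whole string (stack ++ remaining input)
-- is reachable from the original by leftmost rewrites.
theorem fold_chain (p : List Int) (r : Int) (hp : p ≠ []) :
    ∀ lst s, NF p s → (p = [r] → r ∉ lst ∧ r ∉ s) →
      NF p (List.foldl (fun s x => collapse p r (s.length + 1) (s ++ [x])) s lst) ∧
      ∃ k, LSteps p r (s ++ lst)
        (List.foldl (fun s x => collapse p r (s.length + 1) (s ++ [x])) s lst) k := by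
  intro lst
  induction lst with
  | nil =>
    intro s hnf _
    exact ⟨by simpa using hnf, ⟨0, by simpa using LSteps.refl s⟩⟩
  | cons x rest ih =>
    intro s hnf hpre
    have hyx : p = [r] → x ≠ r := by
      intro hh he
      exact (hpre hh).1 (he ▸ List.mem_cons_self)
    obtain ⟨hnf', hch⟩ := collapse_main p r hp (s.length + 1) s x hnf hyx (by omega)
    set s' := collapse p r (s.length + 1) (s ++ [x]) with hs'
    have hpre' : p = [r] → r ∉ rest ∧ r ∉ s' := by
      intro hh
      refine ⟨fun he => (hpre hh).1 (List.mem_cons_of_mem x he), ?_⟩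
      intro he
      obtain ⟨i, hi⟩ := mem_occ_single r s' he
      exact hnf' i (hh ▸ hi)
    obtain ⟨ihnf, ⟨k2, hk2⟩⟩ := ih s' hnf' hpre'
    obtain ⟨k1, hk1⟩ := hch rest
    refine ⟨by simpa [List.foldl_cons] using ihnf, ⟨k1 + k2, ?_⟩⟩
    have heq : s ++ x :: rest = (s ++ [x]) ++ rest := by simp
    rw [heq]
    simpa [List.foldl_cons] using lsteps_trans p r hk1 hk2

-- ===== VERDICT (by name: the statement is the Claim_ definition above) =====
theorem find_replace_in_list_spec : Claim_equal_find_replace_in_list := by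
  intro lst pattern replacement _ hpre
  unfold Spec_find_replace_in_list
  by_cases hp : pattern = []
  · have hl : lst = [] := by
      rcases hpre.1 with h | h
      · exact h
      · exact absurd hp h
    subst hl
    simp [find_replace_in_list, find_replace_in_list_go, aFindGo, find_replace_in_list_alt]
  · obtain ⟨hnf, ⟨k, hk⟩⟩ := fold_chain pattern replacement hp lst []
      (nf_nil pattern hp) (fun hh => ⟨hpre.2 hh, by simp⟩)
    simp only [List.nil_append] at hk
    have hkb : k ≤ lst.length + 1 := steps_bound pattern replacement hp (hpre.2) hk
    have hend : aFindGo pattern (List.foldl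
        (fun s x => collapse pattern replacement (s.length + 1) (s ++ [x])) [] lst) 0 = none :=
      (aFindGo_none pattern hp _).mpr hnf
    unfold find_replace_in_list find_replace_in_list_alt
    exact aLoop_eq pattern replacement hk hend (lst.length + 1) hkb
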